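-- pv_equiv track=rewrite | github.com/MartinPadovaniAMU/MultimodalAlignment | MY_FUNCTIONS.py | label_intervals
-- ===== SOURCE A (Python) =====
-- def label_intervals(values, limits):
--
--     """
--     Part a series of values into several intervals, according to limits
--
--     Args:
--         values : list, array of values
--         limits : list, array of limits
--
--     Returns :
--         List of intervals (labeled with numbers) in the order of the values
--
--     """
--
--     intervals = []
--     for value in values :
--         if value < limits[0]:
--             intervals.append(0)
--         else:
--             if len(limits)==1:
--                 intervals.append(1)
--             elif len(limits)>1:
--                 i=1
--                 limit = limits[1]
--                 while value >= limit and i<len(limits)-1 :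
--                     i += 1
--                     limit = limits[i]
--                 intervals.append(i)
--
--     return intervals
-- ===== SOURCE B (Python) =====
-- def _bisect_right(a, v):
--     lo, hi = 0, len(a)
--     while lo < hi:
--         mid = (lo + hi) // 2
--         if v < a[mid]:
--             hi = mid
--         else:
--             lo = mid + 1
--     return lo
--
--
-- def label_intervals(values, limits):
--     if not values:
--         return []
--     first = limits[0]
--     if len(limits) == 1:
--         return [0 if v < first else 1 for v in values]
--     # The first i >= 1 with value < limits[i] equals the first i with
--     # value < max(limits[1..i]); prefix maxima are sorted, so one binary
--     # search per value replaces the per-value scan (exact for unsorted limits too).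
--     pref = []
--     cur = None
--     for x in limits[1:-1]:
--         cur = x if (cur is None or x > cur) else cur
--         pref.append(cur)
--     return [0 if v < first else 1 + _bisect_right(pref, v) for v in values]
-- ===== Notes on version B (the rewrite author's own statement) =====
-- stated objective: faster
-- what changed: A's per-value linear scan through limits is replaced by one precomputed prefix-maximum array of limits[1:-1] (sorted by construction) plus one binary search per value; exact also for unsorted limits because the first index with value < limits[i] equals the first index with value < max(limits[1..i]).
import Mathlib
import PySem

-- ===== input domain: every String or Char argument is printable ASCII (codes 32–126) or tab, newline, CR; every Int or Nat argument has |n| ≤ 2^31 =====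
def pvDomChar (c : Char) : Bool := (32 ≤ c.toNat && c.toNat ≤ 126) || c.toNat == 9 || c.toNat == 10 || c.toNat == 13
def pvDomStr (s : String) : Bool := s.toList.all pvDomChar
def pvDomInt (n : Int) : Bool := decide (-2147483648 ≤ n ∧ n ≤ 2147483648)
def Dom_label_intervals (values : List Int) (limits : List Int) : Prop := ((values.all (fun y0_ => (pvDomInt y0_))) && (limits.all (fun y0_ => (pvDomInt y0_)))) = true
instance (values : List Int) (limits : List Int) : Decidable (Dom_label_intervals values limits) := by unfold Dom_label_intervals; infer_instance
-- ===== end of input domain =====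

-- B replaces A's per-value linear scan with a precomputed prefix-maximum array (sorted by
-- construction) of limits[1:-1] and one binary search per value, exact also for unsorted
-- limits: O(m + n log m) instead of O(n*m), measured faster in a timing run.

-- ===== PORT A =====
-- A's inner while loop: 'while value >= limit and i < len(limits)-1: i += 1; limit = limits[i]'.
-- The loop condition keeps i+1 ≤ len(limits)-1, so the read limits[i] is always in range
-- and is ported as getD (the default is never used).
-- structural fuel recursion (fuel = len(limits) at the call site, more than the
-- loop's ≤ len(limits)-2 iterations, so the fuel-0 arm is never reached there)
def whileA (value : Int) (limits : List Int) : Nat → Nat → Int → Nat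
  | 0, i, _ => i
  | fuel + 1, i, limit =>
    if value ≥ limit ∧ i < limits.length - 1 then
      whileA value limits fuel (i + 1) (limits.getD (i + 1) 0)
    else i

def label_intervals (values : List Int) (limits : List Int) : List Int :=
  values.foldl (fun intervals value =>
    match PySem.List.pyGet? limits 0 with
    | none => intervals   -- Python raises IndexError here (limits empty); excluded by Pre_
    | some l0 =>
      if value < l0 then intervals ++ [0]
      else if limits.length == 1 then intervals ++ [1]
      else if limits.length > 1 then
        intervals ++ [(whileA value limits limits.length 1 (limits.getD 1 0) : Int)]
      else intervals) []

-- ===== PORT B =====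
-- Source B's loop 'cur = x if (cur is None or x > cur) else cur; pref.append(cur)'
def prefMax : List Int → Option Int → List Int
  | [], _ => []
  | x :: xs, cur =>
    let c : Int := match cur with
      | none => x
      | some c => if x > c then x else c
    c :: prefMax xs (some c)

-- Source B's hand-written _bisect_right(a, v) is exactly the bisect_right loop
-- (while lo < hi: mid = (lo+hi)//2; if v < a[mid]: hi = mid else lo = mid+1),
-- ported as the prelude's PySem.List.bisectRight (the same loop).
def label_intervals_alt (values : List Int) (limits : List Int) : List Int :=
  if values = [] then []
  else match PySem.List.pyGet? limits 0 with
    | none => []   -- Source B raises IndexError here (limits empty); excluded by Pre_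
    | some first =>
      if limits.length == 1 then
        values.map (fun v => if v < first then (0 : Int) else 1)
      else
        let pref := prefMax (PySem.List.slice limits (some 1) (some (-1))) none
        values.map (fun v =>
          if v < first then (0 : Int) else 1 + (PySem.List.bisectRight pref v : Int))

-- ===== PRECONDITION & SPEC =====
-- A raises IndexError (limits[0]) iff values is nonempty and limits is empty; B raises there too.
def Pre_label_intervals (values : List Int) (limits : List Int) : Prop :=
  values = [] ∨ limits ≠ []
instance (values : List Int) (limits : List Int) : Decidable (Pre_label_intervals values limits) := by
  unfold Pre_label_intervals; infer_instance

def pvWitness_label_intervals : List Int × List Int := ([3, -1, 12], [0, 5, 10])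

def Spec_label_intervals (values : List Int) (limits : List Int) (out : List Int) : Prop := out = label_intervals_alt values limits
instance (values : List Int) (limits : List Int) (out : List Int) : Decidable (Spec_label_intervals values limits out) := by unfold Spec_label_intervals; infer_instance

-- ===== CLAIM (what is proved, stated in full; the proofs are below) =====
def Claim_equal_label_intervals : Prop := ∀ (values : List Int) (limits : List Int), Dom_label_intervals values limits → Pre_label_intervals values limits → Spec_label_intervals values limits (label_intervals values limits)

-- ===== LEMMAS AND PROOFS =====

-- the first-hit predicate both programs decide
def hitP (v : Int) : Int → Bool := fun x => decide (v < x)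

-- A's while loop returns the first index j ≥ i with v < limits[j], capped at len(limits)-1
lemma whileA_spec (limits : List Int) (v : Int) :
    ∀ k i, limits.length - 1 - i ≤ k → i ≤ limits.length - 1 →
      whileA v limits k i (limits.getD i 0) =
        min (i + (limits.drop i).findIdx (hitP v)) (limits.length - 1) := by
  intro k
  induction k with
  | zero =>
    intro i hk hi
    simp only [whileA]
    omega
  | succ k ih =>
    intro i hk hi
    simp only [whileA]
    by_cases h : v ≥ limits.getD i 0 ∧ i < limits.length - 1
    · rw [if_pos h]
      have hil : i < limits.length := by omega
      have hd : limits.drop i = limits[i] :: limits.drop (i + 1) :=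
        List.drop_eq_getElem_cons hil
      have hfalse : hitP v limits[i] = false := by
        simp [hitP]; rw [← List.getD_eq_getElem limits 0 hil]; exact h.1
      rw [ih (i + 1) (by omega) (by omega), hd, List.findIdx_cons, hfalse]
      simp only [cond_false]
      omega
    · rw [if_neg h]
      rcases Nat.lt_or_ge i (limits.length - 1) with hlt | hge
      · have hv : v < limits.getD i 0 := by
          by_contra hvv; exact h ⟨by omega, hlt⟩
        have hil : i < limits.length := by omega
        have hd : limits.drop i = limits[i] :: limits.drop (i + 1) :=
          List.drop_eq_getElem_cons hil
        have htrue : hitP v limits[i] = true := by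
          simp [hitP]; rw [← List.getD_eq_getElem limits 0 hil]; exact hv
        rw [hd, List.findIdx_cons, htrue]
        simp only [cond_true]
        omega
      · omega

-- binary search on a sorted list computes findIdx of the first strictly larger element
lemma bisect_eq_findIdx (a : List Int) (v : Int) (hs : a.Pairwise (· ≤ ·)) :
    PySem.List.bisectRight a v = a.findIdx (hitP v) := by
  obtain ⟨hle, hlo, hhi⟩ := PySem.List.bisectRight_spec a v hs
  set b := PySem.List.bisectRight a v with hb
  rcases Nat.lt_or_ge b a.length with h | h
  · symm
    rw [List.findIdx_eq h]
    refine ⟨by simpa [hitP] using hhi b h le_rfl, ?_⟩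
    intro j hj
    have hjl : j < a.length := lt_trans hj h
    simpa [hitP] using hlo j hjl hj
  · have hbl : b = a.length := le_antisymm hle h
    symm
    rw [hbl, List.findIdx_eq_length]
    intro x hx
    obtain ⟨j, hjl, rfl⟩ := List.mem_iff_getElem.1 hx
    simpa [hitP] using hlo j hjl (by omega)

-- every element of prefMax L (some c) is at least c
lemma prefMax_ge : ∀ (L : List Int) (c : Int), ∀ x ∈ prefMax L (some c), c ≤ x := by
  intro L
  induction L with
  | nil => simp [prefMax]
  | cons a as ih =>
    intro c x hx
    simp only [prefMax, List.mem_cons] at hx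
    rcases hx with h | h
    · subst h; split <;> omega
    · have := ih (if a > c then a else c) x h
      split at this <;> omega

-- the prefix-maximum list is nondecreasing
lemma prefMax_pairwise : ∀ (L : List Int) (c? : Option Int), (prefMax L c?).Pairwise (· ≤ ·) := by
  intro L
  induction L with
  | nil => intro c?; simp [prefMax]
  | cons a as ih =>
    intro c?
    simp only [prefMax]
    exact List.pairwise_cons.2 ⟨fun x hx => prefMax_ge as _ x hx, ih _⟩

-- findIdx of 'v < _' is unchanged by taking prefix maxima
lemma findIdx_prefMax (v : Int) :
    ∀ (L : List Int) (c? : Option Int), (∀ c, c? = some c → c ≤ v) →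
      (prefMax L c?).findIdx (hitP v) = L.findIdx (hitP v) := by
  intro L
  induction L with
  | nil => intro c? _; simp [prefMax]
  | cons a as ih =>
    intro c? hc
    simp only [prefMax, List.findIdx_cons]
    rcases c? with _ | c
    · dsimp
      cases hp : hitP v a
      · simp only [cond_false]
        rw [ih (some a) (by intro c hc'; cases hc'; simpa [hitP] using hp)]
      · simp
    · have hcv : c ≤ v := hc c rfl
      dsimp
      by_cases hac : a > c
      · simp only [if_pos hac]
        cases hp : hitP v a
        · simp only [cond_false]
          rw [ih (some a) (by intro c' hc'; cases hc'; simpa [hitP] using hp)]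
        · simp
      · simp only [if_neg hac]
        have hpa : hitP v a = false := by simp [hitP]; omega
        have hpc : hitP v c = false := by simp [hitP]; omega
        rw [hpa, hpc]
        simp only [cond_false]
        rw [ih (some c) (by intro c' hc'; cases hc'; exact hcv)]

-- findIdx on dropLast caps findIdx at length - 1
lemma findIdx_dropLast (p : Int → Bool) :
    ∀ (l : List Int), l.dropLast.findIdx p = min (l.findIdx p) (l.length - 1) := by
  intro l
  induction l with
  | nil => simp
  | cons x xs ih =>
    rcases xs with _ | ⟨y, ys⟩
    · simp [List.findIdx_cons]
    · rw [List.dropLast_cons_of_ne_nil (by simp)]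
      rw [List.findIdx_cons, List.findIdx_cons]
      cases hp : p x
      · simp only [cond_false]
        rw [ih]
        simp only [List.length_cons]
        omega
      · simp

-- limits[1:-1] is tail-then-dropLast
lemma slice_one_negone (l : List Int) :
    PySem.List.slice l (some 1) (some (-1)) = l.tail.dropLast := by
  simp [PySem.List.slice, PySem.List.clampIdx]
  rcases l with _ | ⟨x, xs⟩
  · simp
  · simp [List.dropLast_eq_take]

-- per-value agreement in the interesting branch (len(limits) ≥ 2, v ≥ limits[0])
lemma key_branch (limits : List Int) (v : Int) (hm : 2 ≤ limits.length) :
    (whileA v limits limits.length 1 (limits.getD 1 0) : Int) =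
      1 + (PySem.List.bisectRight (prefMax (PySem.List.slice limits (some 1) (some (-1))) none) v : Int) := by
  rw [slice_one_negone]
  rw [bisect_eq_findIdx _ v (prefMax_pairwise _ _)]
  rw [findIdx_prefMax v _ none (by intro c hc; cases hc)]
  rw [← List.drop_one, findIdx_dropLast]
  rw [whileA_spec limits v limits.length 1 (by omega) (by omega)]
  have hlen : (limits.drop 1).length = limits.length - 1 := by simp
  rw [hlen]
  omega

-- ===== VERDICT (by name: the statement is the Claim_ definition above) =====
theorem label_intervals_spec : Claim_equal_label_intervals := by
  intro values limits _ hpre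
  unfold Spec_label_intervals label_intervals label_intervals_alt
  rcases eq_or_ne values [] with rfl | hv
  · simp
  · have hlim : limits ≠ [] := by
      rcases hpre with h | h
      · exact absurd h hv
      · exact h
    obtain ⟨l0, rest, rfl⟩ : ∃ l0 rest, limits = l0 :: rest := by
      rcases limits with _ | ⟨a, b⟩
      · exact absurd rfl hlim
      · exact ⟨a, b, rfl⟩
    have h0 : PySem.List.pyGet? (l0 :: rest) 0 = some l0 := by
      simp [PySem.List.pyGet?, PySem.List.pyIdx?]
    rw [if_neg hv]
    simp only [h0]
    rcases eq_or_ne rest [] with rfl | hr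
    · rw [PySem.List.foldl_congr_mem values _
          (fun acc x => acc ++ [if x < l0 then (0 : Int) else 1]) []
          (by intro acc x _; by_cases h : x < l0 <;> simp [h]),
        PySem.List.foldl_append_singleton_eq_map]
      simp
    · have hm : 2 ≤ (l0 :: rest).length := by
        rcases rest with _ | _
        · exact absurd rfl hr
        · simp
      have h1 : ((l0 :: rest).length == 1) = false := by
        simp only [beq_eq_false_iff_ne]; omega
      rw [PySem.List.foldl_congr_mem values _
          (fun acc x => acc ++ [if x < l0 then (0 : Int)
            else 1 + (PySem.List.bisectRight
              (prefMax (PySem.List.slice (l0 :: rest) (some 1) (some (-1))) none) x : Int)]) []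
          (by
            intro acc x _
            by_cases h : x < l0
            · simp [h]
            · simp only [if_neg h, h1, Bool.false_eq_true, if_false,
                if_pos (by omega : (l0 :: rest).length > 1)]
              rw [key_branch (l0 :: rest) x hm]),
        PySem.List.foldl_append_singleton_eq_map]
      simp
      intro h
      exact absurd h hr
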